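-- pv_equiv track=rewrite | github.com/raeez/chiral-bar-cobar | scripts/phantom_detector_v2.py | strip_comments_keep_lines
-- ===== SOURCE A (Python) =====
-- def strip_comments_keep_lines(text: str) -> list[str]:
--     """Return per-line comment-stripped text but keep ORIGINAL lines too.
--
--     We need originals to inspect in-line comments for the AP286 cross-vol
--     target recognition; comment-stripped content is used for env/label
--     detection.
--     """
--     stripped = []
--     for line in text.splitlines():
--         out = []
--         i = 0
--         while i < len(line):
--             if line[i] == "%" and (i == 0 or line[i - 1] != "\\"):
--                 break
--             out.append(line[i])
--             i += 1
--         stripped.append("".join(out))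
--     return stripped
-- ===== SOURCE B (Python) =====
-- import re
--
-- _PCT = re.compile(r'(?<!\\)%')
--
-- def strip_comments_keep_lines(text: str) -> list[str]:
--     """Regex find-and-slice: cut each line at its first unescaped '%'."""
--     result = []
--     for line in text.splitlines():
--         m = _PCT.search(line)
--         result.append(line if m is None else line[:m.start()])
--     return result
-- ===== Notes on version B (the rewrite author's own statement) =====
-- stated objective: idiomatic
-- what changed: B replaces A's per-character while-loop with append/join accumulator by a precompiled regex with a negative lookbehind that locates the first unescaped percent sign and slices the line there (find-position-then-slice instead of char-by-char copy).
import Mathlib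
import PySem

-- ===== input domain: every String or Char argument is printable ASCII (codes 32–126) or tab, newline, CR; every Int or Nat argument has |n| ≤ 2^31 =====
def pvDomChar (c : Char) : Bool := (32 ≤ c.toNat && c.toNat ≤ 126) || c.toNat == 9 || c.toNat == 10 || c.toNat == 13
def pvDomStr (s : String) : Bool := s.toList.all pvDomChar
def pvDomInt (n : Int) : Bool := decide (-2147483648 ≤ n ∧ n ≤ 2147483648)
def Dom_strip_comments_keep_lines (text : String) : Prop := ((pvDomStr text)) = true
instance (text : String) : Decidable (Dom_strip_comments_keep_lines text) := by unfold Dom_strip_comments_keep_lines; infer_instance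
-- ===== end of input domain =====

-- B replaces A's char-by-char copy loop with regex find-first-unescaped-'%' then slice; objective: idiomatic.

-- ===== PORT A =====
-- the inner `while i < len(line)` loop: scans char by char, breaking at an unescaped '%'
def pvLoopA (cs : List Char) (i : Nat) (out : List Char) : List Char :=
  if h : i < cs.length then
    if cs[i] = '%' ∧ (i = 0 ∨ cs[i-1]'(Nat.lt_of_le_of_lt (Nat.sub_le i 1) h) ≠ '\\') then out
    else pvLoopA cs (i+1) (out ++ [cs[i]])
  else out
termination_by cs.length - i

def strip_comments_keep_lines (text : String) : List String :=
  (PySem.Str.splitlines text).foldl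
    (fun stripped line => stripped ++ [String.ofList (pvLoopA line.toList 0 [])]) []

-- ===== PORT B =====
-- semantics of the regex r'(?<!\\)%' at position i: a '%' not preceded by a backslash
def pvBad (cs : List Char) (i : Nat) : Bool :=
  cs.getD i ' ' == '%' && (i == 0 || cs.getD (i-1) ' ' != '\\')

-- `_PCT.search(line)`: position of the regex's first match, if any
def pvSearch (cs : List Char) : Option Nat :=
  (List.range cs.length).find? (pvBad cs)

def strip_comments_keep_lines_alt (text : String) : List String :=
  (PySem.Str.splitlines text).map (fun line =>
    match pvSearch line.toList with
    | none => line
    | some m => String.ofList (line.toList.take m))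

-- ===== PRECONDITION & SPEC =====
def Spec_strip_comments_keep_lines (text : String) (out : List String) : Prop := out = strip_comments_keep_lines_alt text
instance (text : String) (out : List String) : Decidable (Spec_strip_comments_keep_lines text out) := by unfold Spec_strip_comments_keep_lines; infer_instance

-- ===== CLAIM (what is proved, stated in full; the proofs are below) =====
def Claim_equal_strip_comments_keep_lines : Prop := ∀ (text : String), Dom_strip_comments_keep_lines text → Spec_strip_comments_keep_lines text (strip_comments_keep_lines text)

-- ===== LEMMAS AND PROOFS =====

theorem pv_foldl_append_map {α β : Type} (f : α → β) (l : List α) (acc : List β) :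
    l.foldl (fun a x => a ++ [f x]) acc = acc ++ l.map f := by
  induction l generalizing acc with
  | nil => simp
  | cons x xs ih => simp [List.foldl, ih]

theorem pv_range_drop (n i : Nat) : (List.range n).drop i = List.range' i (n - i) := by
  apply List.ext_getElem
  · simp
  · intro j h1 h2
    simp at h1 h2 ⊢

theorem pv_loopA_acc (cs : List Char) (i : Nat) (out : List Char) :
    pvLoopA cs i out = out ++ pvLoopA cs i [] := by
  rw [pvLoopA, pvLoopA]
  split
  · split
    · simp
    · rw [pv_loopA_acc cs (i+1) (out ++ [_]), pv_loopA_acc cs (i+1) ([] ++ [_])]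
      simp
  · simp
termination_by cs.length - i

theorem pv_bad_iff (cs : List Char) (i : Nat) (h : i < cs.length) :
    pvBad cs i = true ↔
      (cs[i] = '%' ∧ (i = 0 ∨ cs[i-1]'(Nat.lt_of_le_of_lt (Nat.sub_le i 1) h) ≠ '\\')) := by
  have h1 : i - 1 < cs.length := Nat.lt_of_le_of_lt (Nat.sub_le i 1) h
  simp [pvBad, List.getD, List.getElem?_eq_getElem h, List.getElem?_eq_getElem h1]

theorem pv_loopA_find (cs : List Char) (i : Nat) :
    pvLoopA cs i [] =
      match (List.range' i (cs.length - i)).find? (pvBad cs) with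
      | none => cs.drop i
      | some m => (cs.take m).drop i := by
  by_cases h : i < cs.length
  · have hn : cs.length - i = (cs.length - (i+1)) + 1 := by omega
    rw [hn, List.range'_succ]
    by_cases hb : pvBad cs i = true
    · rw [pvLoopA]
      simp only [h, dite_true, if_pos ((pv_bad_iff cs i h).mp hb)]
      simp only [List.find?_cons, hb]
      exact (List.drop_eq_nil_of_le (by simp)).symm
    · rw [pvLoopA]
      simp only [h, dite_true,
        if_neg (fun hc => hb ((pv_bad_iff cs i h).mpr hc))]
      rw [pv_loopA_acc, pv_loopA_find cs (i+1)]
      simp only [List.find?_cons, hb]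
      have hdrop : cs.drop i = cs[i] :: cs.drop (i+1) :=
        List.drop_eq_getElem_cons h
      cases hfind : (List.range' (i+1) (cs.length - (i+1))).find? (pvBad cs) with
      | none => rw [hdrop]; simp
      | some m =>
          have hm : i + 1 ≤ m := by
            have := List.mem_range'_1.mp (List.mem_of_find?_eq_some hfind)
            omega
          have : (cs.take m).drop i = cs[i] :: (cs.take m).drop (i+1) := by
            rw [List.drop_eq_getElem_cons (by simp; omega)]
            simp [List.getElem_take]
          show ([] ++ [cs[i]] ++ List.drop (i+1) (List.take m cs)) = List.drop i (List.take m cs)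
          rw [this]; simp
  · have hn : cs.length - i = 0 := by omega
    rw [pvLoopA]
    simp only [h, hn, dite_false, List.range'_zero, List.find?_nil]
    exact (List.drop_eq_nil_of_le (by omega)).symm
termination_by cs.length - i

theorem pv_line_eq (line : String) :
    String.ofList (pvLoopA line.toList 0 []) =
      (match pvSearch line.toList with
       | none => line
       | some m => String.ofList (line.toList.take m)) := by
  rw [pv_loopA_find]
  unfold pvSearch
  rw [show List.range line.toList.length = List.range' 0 (line.toList.length - 0) by
        rw [← pv_range_drop]; simp]
  cases (List.range' 0 (line.toList.length - 0)).find? (pvBad line.toList) with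
  | none => simp
  | some m => simp

-- ===== VERDICT (by name: the statement is the Claim_ definition above) =====
theorem strip_comments_keep_lines_spec : Claim_equal_strip_comments_keep_lines := by
  intro text _
  unfold Spec_strip_comments_keep_lines strip_comments_keep_lines strip_comments_keep_lines_alt
  rw [pv_foldl_append_map]
  simp only [List.nil_append]
  exact List.map_congr_left (fun line _ => pv_line_eq line)
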